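-- pv_equiv track=rewrite | github.com/JonFermin/auto-erdos | library/_ff.py | _pow_x_fast
-- ===== SOURCE A (Python) =====
-- def _mul_in_cubic(a: tuple[int, int, int], b: tuple[int, int, int], cubic: tuple[int, int, int], q: int) -> tuple[int, int, int]:
--     """Multiply two F_q[x] / cubic elements."""
--     a0, a1, a2 = a
--     b0, b1, b2 = b
--     c2, c1, c0 = cubic
--
--     # Polynomial product (degree up to 4).
--     p0 = a0 * b0
--     p1 = a0 * b1 + a1 * b0
--     p2 = a0 * b2 + a1 * b1 + a2 * b0
--     p3 = a1 * b2 + a2 * b1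
--     p4 = a2 * b2
--
--     # Reduction:
--     #   x^3 = -c2 x^2 - c1 x - c0
--     #   x^4 = (c2^2 - c1) x^2 + (c2 c1 - c0) x + c2 c0
--     r0 = p0 - p3 * c0 + p4 * (c2 * c0)
--     r1 = p1 - p3 * c1 + p4 * (c2 * c1 - c0)
--     r2 = p2 - p3 * c2 + p4 * (c2 * c2 - c1)
--
--     return (r0 % q, r1 % q, r2 % q)
--
-- def _pow_x_fast(cubic: tuple[int, int, int], q: int, k: int) -> tuple[int, int, int]:
--     """x^k via square-and-multiply in F_q[x] / cubic."""
--     if k == 0: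
--         return (1, 0, 0)
--     base = (0, 1, 0)  # x
--     result = (1, 0, 0)
--     while k > 0:
--         if k & 1:
--             result = _mul_in_cubic(result, base, cubic, q)
--         base = _mul_in_cubic(base, base, cubic, q)
--         k >>= 1
--     return result
-- ===== SOURCE B (Python) =====
-- def _mul_in_cubic(a: tuple[int, int, int], b: tuple[int, int, int], cubic: tuple[int, int, int], q: int) -> tuple[int, int, int]:
--     """Multiply two F_q[x] / cubic elements."""
--     a0, a1, a2 = a
--     b0, b1, b2 = b
--     c2, c1, c0 = cubic
--
--     p0 = a0 * b0
--     p1 = a0 * b1 + a1 * b0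
--     p2 = a0 * b2 + a1 * b1 + a2 * b0
--     p3 = a1 * b2 + a2 * b1
--     p4 = a2 * b2
--
--     r0 = p0 - p3 * c0 + p4 * (c2 * c0)
--     r1 = p1 - p3 * c1 + p4 * (c2 * c1 - c0)
--     r2 = p2 - p3 * c2 + p4 * (c2 * c2 - c1)
--
--     return (r0 % q, r1 % q, r2 % q)
--
-- def _pow_x_fast(cubic: tuple[int, int, int], q: int, k: int) -> tuple[int, int, int]:
--     """x^k via left-to-right (MSB-first) squaring over the bit string of k."""
--     if k <= 0:
--         return (1, 0, 0)
--     result = (1, 0, 0)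
--     for bit in bin(k)[2:]:
--         result = _mul_in_cubic(result, result, cubic, q)
--         if bit == '1':
--             result = _mul_in_cubic(result, (0, 1, 0), cubic, q)
--     return result
-- ===== Notes on version B (the rewrite author's own statement) =====
-- stated objective: alternative
-- what changed: Replaces A's right-to-left square-and-multiply (which shifts k, keeps a separately squared base, and conditionally multiplies it into the accumulator) with the left-to-right variant that walks the bit string of k MSB-first, squaring the single accumulator and multiplying by x on each 1-bit; no base variable and no bit shifting of k.
import Mathlib
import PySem

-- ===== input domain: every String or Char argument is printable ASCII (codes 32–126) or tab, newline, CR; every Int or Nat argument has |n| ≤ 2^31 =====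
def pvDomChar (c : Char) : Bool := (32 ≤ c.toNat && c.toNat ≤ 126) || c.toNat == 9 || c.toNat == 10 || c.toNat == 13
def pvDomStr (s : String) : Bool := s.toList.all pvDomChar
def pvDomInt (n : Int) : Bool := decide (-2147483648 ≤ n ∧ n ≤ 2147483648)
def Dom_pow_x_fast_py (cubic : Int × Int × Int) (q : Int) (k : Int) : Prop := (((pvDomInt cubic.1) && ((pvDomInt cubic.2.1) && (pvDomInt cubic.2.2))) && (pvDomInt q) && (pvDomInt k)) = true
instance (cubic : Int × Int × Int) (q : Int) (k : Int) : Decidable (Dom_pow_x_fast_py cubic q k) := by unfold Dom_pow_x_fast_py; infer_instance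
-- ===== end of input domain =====

-- B replaces A's right-to-left square-and-multiply (shifted k, separately squared base) with the
-- left-to-right variant over the bit string of k (square the accumulator, multiply by x on 1-bits);
-- equal return values are proved; no argument is mutated.

-- ===== PORT A =====

-- port of _mul_in_cubic, shared module helper used by both A and B (transliterated step for step;
-- Python's % is PySem.Int.mod, exact for q ≠ 0 — q = 0 with k > 0 is excluded by Pre_).
def mulInCubic (a b cubic : Int × Int × Int) (q : Int) : Int × Int × Int :=
  let (a0, a1, a2) := a
  let (b0, b1, b2) := b
  let (c2, c1, c0) := cubic
  let p0 := a0 * b0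
  let p1 := a0 * b1 + a1 * b0
  let p2 := a0 * b2 + a1 * b1 + a2 * b0
  let p3 := a1 * b2 + a2 * b1
  let p4 := a2 * b2
  let r0 := p0 - p3 * c0 + p4 * (c2 * c0)
  let r1 := p1 - p3 * c1 + p4 * (c2 * c1 - c0)
  let r2 := p2 - p3 * c2 + p4 * (c2 * c2 - c1)
  (PySem.Int.mod r0 q, PySem.Int.mod r1 q, PySem.Int.mod r2 q)

-- termination helper for A's loop: k >> 1 shrinks a positive k
theorem pvHalf_lt (k : Int) (h : 0 < k) : (PySem.Int.floordiv k 2).toNat < k.toNat := by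
  have h1 := PySem.Int.floordiv_mul_add_mod k 2
  have h2 := PySem.Int.mod_nonneg k (b := 2) (by norm_num)
  have h3 := PySem.Int.mod_lt k (b := 2) (by norm_num)
  omega

-- A's while-loop over the bits of k, as recursion on k (for the ints reaching it, k & 1 is
-- PySem.Int.mod k 2 and k >> 1 is PySem.Int.floordiv k 2 — Python's & and >> floor / use
-- two's complement, so both renderings are exact on all ints).
def powLoopA (cubic : Int × Int × Int) (q : Int) (base result : Int × Int × Int) (k : Int) :
    Int × Int × Int :=
  if h : 0 < k then
    let result' := if PySem.Int.mod k 2 = 1 then mulInCubic result base cubic q else result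
    powLoopA cubic q (mulInCubic base base cubic q) result' (PySem.Int.floordiv k 2)
  else result
termination_by k.toNat
decreasing_by exact pvHalf_lt k h

def pow_x_fast_py (cubic : Int × Int × Int) (q : Int) (k : Int) : Int × Int × Int :=
  if k = 0 then (1, 0, 0)
  else powLoopA cubic q (0, 1, 0) (1, 0, 0) k

-- ===== PORT B =====

-- MSB-first bits of n: transliteration of bin(k)[2:] ('1' rendered as true); [] for n = 0
def natBits (n : Nat) : List Bool :=
  if n = 0 then [] else natBits (n / 2) ++ [decide (n % 2 = 1)]
termination_by n
decreasing_by exact Nat.div_lt_self (by omega) (by omega)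

-- B's per-bit loop body: square the accumulator, multiply by x on a 1-bit
def stepB (cubic : Int × Int × Int) (q : Int) (r : Int × Int × Int) (bit : Bool) :
    Int × Int × Int :=
  let s := mulInCubic r r cubic q
  if bit then mulInCubic s (0, 1, 0) cubic q else s

def pow_x_fast_py_alt (cubic : Int × Int × Int) (q : Int) (k : Int) : Int × Int × Int :=
  if k ≤ 0 then (1, 0, 0)
  else (natBits k.toNat).foldl (stepB cubic q) (1, 0, 0)

-- ===== PRECONDITION & SPEC =====
-- Pre_ excludes exactly q = 0 with k > 0, where Python's `% q` raises ZeroDivisionError (in A and in B alike).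
def Pre_pow_x_fast_py (cubic : Int × Int × Int) (q : Int) (k : Int) : Prop := q ≠ 0 ∨ k ≤ 0
instance (cubic : Int × Int × Int) (q : Int) (k : Int) : Decidable (Pre_pow_x_fast_py cubic q k) := by
  unfold Pre_pow_x_fast_py; infer_instance

def pvWitness_pow_x_fast_py : (Int × Int × Int) × Int × Int := ((1, 1, 1), 5, 6)

def Spec_pow_x_fast_py (cubic : Int × Int × Int) (q : Int) (k : Int) (out : Int × Int × Int) : Prop := out = pow_x_fast_py_alt cubic q k
instance (cubic : Int × Int × Int) (q : Int) (k : Int) (out : Int × Int × Int) : Decidable (Spec_pow_x_fast_py cubic q k out) := by unfold Spec_pow_x_fast_py; infer_instance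

-- ===== CLAIM (what is proved, stated in full; the proofs are below) =====
def Claim_equal_pow_x_fast_py : Prop := ∀ (cubic : Int × Int × Int) (q : Int) (k : Int), Dom_pow_x_fast_py cubic q k → Pre_pow_x_fast_py cubic q k → Spec_pow_x_fast_py cubic q k (pow_x_fast_py cubic q k)

-- ===== LEMMAS AND PROOFS =====

-- Python's % q identifies integers that differ by a multiple of q (also vacuously at q = 0)
theorem pvMod_eq_of_dvd {x y q : Int} (h : q ∣ x - y) :
    PySem.Int.mod x q = PySem.Int.mod y q := by
  rcases eq_or_ne q 0 with rfl | hq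
  · obtain rfl : x = y := by have := h; omega
    rfl
  · have h1 := PySem.Int.floordiv_mul_add_mod x q
    have h2 := PySem.Int.floordiv_mul_add_mod y q
    have hd : q ∣ PySem.Int.mod x q - PySem.Int.mod y q := by
      have : PySem.Int.mod x q - PySem.Int.mod y q =
          (x - y) - (PySem.Int.floordiv x q - PySem.Int.floordiv y q) * q := by ring_nf; omega
      rw [this]
      exact dvd_sub h (Dvd.intro_left _ rfl)
    have hz : PySem.Int.mod x q - PySem.Int.mod y q = 0 := by
      rcases lt_or_gt_of_ne hq with hneg | hpos
      · have bx := PySem.Int.mod_neg_bounds x hneg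
        have by' := PySem.Int.mod_neg_bounds y hneg
        exact Int.eq_zero_of_abs_lt_dvd ((neg_dvd).mpr hd) (abs_lt.mpr (by omega))
      · have bx1 := PySem.Int.mod_nonneg x hpos
        have bx2 := PySem.Int.mod_lt x hpos
        have by1 := PySem.Int.mod_nonneg y hpos
        have by2 := PySem.Int.mod_lt y hpos
        exact Int.eq_zero_of_abs_lt_dvd hd (abs_lt.mpr (by omega))
    omega

-- q divides (x % q) - x
theorem pvMod_sub_self_dvd (x q : Int) : q ∣ PySem.Int.mod x q - x :=
  ⟨-(PySem.Int.floordiv x q), by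
    have h := PySem.Int.floordiv_mul_add_mod x q; linear_combination h⟩

-- the pure integer cubic reduction of the product (mulInCubic before the final % q)
def rf (a b cubic : Int × Int × Int) : Int × Int × Int :=
  ( a.1 * b.1 - (a.2.1 * b.2.2 + a.2.2 * b.2.1) * cubic.2.2
      + a.2.2 * b.2.2 * (cubic.1 * cubic.2.2)
  , a.1 * b.2.1 + a.2.1 * b.1 - (a.2.1 * b.2.2 + a.2.2 * b.2.1) * cubic.2.1
      + a.2.2 * b.2.2 * (cubic.1 * cubic.2.1 - cubic.2.2)
  , a.1 * b.2.2 + a.2.1 * b.2.1 + a.2.2 * b.1 - (a.2.1 * b.2.2 + a.2.2 * b.2.1) * cubic.1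
      + a.2.2 * b.2.2 * (cubic.1 * cubic.1 - cubic.2.1) )

def modE (v : Int × Int × Int) (q : Int) : Int × Int × Int :=
  (PySem.Int.mod v.1 q, PySem.Int.mod v.2.1 q, PySem.Int.mod v.2.2 q)

theorem mulInCubic_eq (a b c : Int × Int × Int) (q : Int) :
    mulInCubic a b c q = modE (rf a b c) q := by
  obtain ⟨a0, a1, a2⟩ := a; obtain ⟨b0, b1, b2⟩ := b; obtain ⟨c2, c1, c0⟩ := c
  simp only [mulInCubic, rf, modE]

theorem modE_modE (v : Int × Int × Int) (q : Int) :
    modE (modE v q) q = modE v q := by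
  obtain ⟨v0, v1, v2⟩ := v
  simp only [modE]
  exact Prod.ext (pvMod_eq_of_dvd (pvMod_sub_self_dvd v0 q))
    (Prod.ext (pvMod_eq_of_dvd (pvMod_sub_self_dvd v1 q))
      (pvMod_eq_of_dvd (pvMod_sub_self_dvd v2 q)))

theorem modE_rf_left (a b c : Int × Int × Int) (q : Int) :
    modE (rf (modE a q) b c) q = modE (rf a b c) q := by
  obtain ⟨a0, a1, a2⟩ := a; obtain ⟨b0, b1, b2⟩ := b; obtain ⟨c2, c1, c0⟩ := c
  have h0 : PySem.Int.mod a0 q ≡ a0 [ZMOD q] :=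
    Int.ModEq.symm (Int.modEq_iff_dvd.mpr (pvMod_sub_self_dvd a0 q))
  have h1 : PySem.Int.mod a1 q ≡ a1 [ZMOD q] :=
    Int.ModEq.symm (Int.modEq_iff_dvd.mpr (pvMod_sub_self_dvd a1 q))
  have h2 : PySem.Int.mod a2 q ≡ a2 [ZMOD q] :=
    Int.ModEq.symm (Int.modEq_iff_dvd.mpr (pvMod_sub_self_dvd a2 q))
  simp only [rf, modE]
  refine Prod.ext ?_ (Prod.ext ?_ ?_)
  · exact pvMod_eq_of_dvd
      (((h0.mul_right b0).sub (((h1.mul_right b2).add (h2.mul_right b1)).mul_right c0)).add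
        (((h2.mul_right b2)).mul_right (c2 * c0))).symm.dvd
  · exact pvMod_eq_of_dvd
      ((((h0.mul_right b1).add (h1.mul_right b0)).sub
          (((h1.mul_right b2).add (h2.mul_right b1)).mul_right c1)).add
        (((h2.mul_right b2)).mul_right (c2 * c1 - c0))).symm.dvd
  · exact pvMod_eq_of_dvd
      (((((h0.mul_right b2).add (h1.mul_right b1)).add (h2.mul_right b0)).sub
          (((h1.mul_right b2).add (h2.mul_right b1)).mul_right c2)).add
        (((h2.mul_right b2)).mul_right (c2 * c2 - c1))).symm.dvd

theorem rf_comm (a b c : Int × Int × Int) : rf a b c = rf b a c := by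
  obtain ⟨a0, a1, a2⟩ := a; obtain ⟨b0, b1, b2⟩ := b; obtain ⟨c2, c1, c0⟩ := c
  simp only [rf]
  refine Prod.ext ?_ (Prod.ext ?_ ?_) <;> ring

theorem modE_rf_right (a b c : Int × Int × Int) (q : Int) :
    modE (rf a (modE b q) c) q = modE (rf a b c) q := by
  rw [rf_comm a, modE_rf_left, rf_comm b]

theorem rf_assoc (a b d c : Int × Int × Int) :
    rf (rf a b c) d c = rf a (rf b d c) c := by
  obtain ⟨a0, a1, a2⟩ := a; obtain ⟨b0, b1, b2⟩ := b
  obtain ⟨d0, d1, d2⟩ := d; obtain ⟨c2, c1, c0⟩ := c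
  simp only [rf]
  refine Prod.ext ?_ (Prod.ext ?_ ?_) <;> ring

-- mulInCubic-level algebra
theorem mul_comm' (a b c : Int × Int × Int) (q : Int) :
    mulInCubic a b c q = mulInCubic b a c q := by
  simp only [mulInCubic_eq]; rw [rf_comm]

theorem mul_assoc' (a b d c : Int × Int × Int) (q : Int) :
    mulInCubic (mulInCubic a b c q) d c q = mulInCubic a (mulInCubic b d c q) c q := by
  simp only [mulInCubic_eq]
  rw [modE_rf_left, rf_assoc, ← modE_rf_right]

theorem mul_modE_left (a b c : Int × Int × Int) (q : Int) :
    mulInCubic (modE a q) b c q = mulInCubic a b c q := by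
  simp only [mulInCubic_eq]; rw [modE_rf_left]

theorem modE_mul (a b c : Int × Int × Int) (q : Int) :
    modE (mulInCubic a b c q) q = mulInCubic a b c q := by
  simp only [mulInCubic_eq]; rw [modE_modE]

theorem mul_one_left (a c : Int × Int × Int) (q : Int) :
    mulInCubic (1, 0, 0) a c q = modE a q := by
  obtain ⟨a0, a1, a2⟩ := a; obtain ⟨c2, c1, c0⟩ := c
  simp only [mulInCubic, modE]
  norm_num

-- canonical powers of x: pw n is what both programs compute for exponent n ≥ 1
def pw (c : Int × Int × Int) (q : Int) : ℕ → Int × Int × Int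
  | 0 => (1, 0, 0)
  | n + 1 => mulInCubic (pw c q n) (0, 1, 0) c q

theorem pw_red (c : Int × Int × Int) (q : Int) (n : ℕ) (hn : 1 ≤ n) :
    modE (pw c q n) q = pw c q n := by
  obtain ⟨m, rfl⟩ := Nat.exists_eq_add_of_le hn
  rw [Nat.add_comm]
  exact modE_mul _ _ _ _

theorem pw_mul (c : Int × Int × Int) (q : Int) (m : ℕ) (hm : 1 ≤ m) :
    ∀ n : ℕ, mulInCubic (pw c q m) (pw c q n) c q = pw c q (m + n) := by
  intro n
  induction n with
  | zero =>
    rw [mul_comm']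
    show mulInCubic (1, 0, 0) (pw c q m) c q = pw c q m
    rw [mul_one_left, pw_red c q m hm]
  | succ n ih =>
    show mulInCubic (pw c q m) (mulInCubic (pw c q n) (0, 1, 0) c q) c q = _
    rw [← mul_assoc', ih]
    rfl

theorem pw_one (c : Int × Int × Int) (q : Int) : pw c q 1 = modE (0, 1, 0) q := by
  show mulInCubic (1, 0, 0) (0, 1, 0) c q = _
  rw [mul_one_left]

theorem mul_xx (c : Int × Int × Int) (q : Int) :
    mulInCubic (0, 1, 0) (0, 1, 0) c q = pw c q 2 := by
  show _ = mulInCubic (pw c q 1) (0, 1, 0) c q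
  rw [pw_one, mul_modE_left]

-- arithmetic facts about k >> 1 and k & 1 for a positive k
theorem pvHalf_facts (k : Int) (h : 0 < k) :
    0 ≤ PySem.Int.floordiv k 2 ∧
    k = 2 * PySem.Int.floordiv k 2 + PySem.Int.mod k 2 ∧
    (PySem.Int.mod k 2 = 0 ∨ PySem.Int.mod k 2 = 1) := by
  have h1 := PySem.Int.floordiv_mul_add_mod k 2
  have h2 := PySem.Int.mod_nonneg k (show (0:Int) < 2 by norm_num)
  have h3 := PySem.Int.mod_lt k (show (0:Int) < 2 by norm_num)
  omega

-- A's loop invariant: with base = pw m (m ≥ 1) and k > 0 the loop returns result ⊗ pw (m·k)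
theorem loopA_inv (c : Int × Int × Int) (q : Int) :
    ∀ kn : ℕ, ∀ k : Int, k.toNat = kn → 0 < k → ∀ m : ℕ, 1 ≤ m → ∀ r,
      powLoopA c q (pw c q m) r k = mulInCubic r (pw c q (m * kn)) c q := by
  intro kn
  induction kn using Nat.strong_induction_on with
  | _ kn IH =>
    intro k hk hpos m hm r
    obtain ⟨hk0, hkeq, hmod⟩ := pvHalf_facts k hpos
    rw [powLoopA, dif_pos hpos]
    by_cases hk' : 0 < PySem.Int.floordiv k 2
    · rw [pw_mul c q m hm m, IH (PySem.Int.floordiv k 2).toNat (by omega) _ rfl hk'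
        (m + m) (by omega)]
      rcases hmod with he | ho
      · have hkn : kn = 2 * (PySem.Int.floordiv k 2).toNat := by omega
        rw [if_neg (by omega)]
        congr 2
        rw [hkn]; ring
      · have hkn : kn = 2 * (PySem.Int.floordiv k 2).toNat + 1 := by omega
        rw [if_pos ho, mul_assoc', pw_mul c q m hm]
        congr 2
        rw [hkn]; ring
    · -- k = 1: the recursive call returns its result argument
      have hk1 : kn = 1 := by omega
      have hmo : PySem.Int.mod k 2 = 1 := by omega
      rw [powLoopA, dif_neg hk', if_pos hmo, hk1]
      congr 2
      ring

theorem A_eq_pw (c : Int × Int × Int) (q : Int) (k : Int) (h : 0 < k) :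
    pow_x_fast_py c q k = pw c q k.toNat := by
  obtain ⟨hk0, hkeq, hmod⟩ := pvHalf_facts k h
  have hpw1 : mulInCubic (1, 0, 0) (0, 1, 0) c q = pw c q 1 := rfl
  rw [pow_x_fast_py, if_neg (by omega), powLoopA, dif_pos h, mul_xx]
  by_cases hk' : 0 < PySem.Int.floordiv k 2
  · rw [loopA_inv c q (PySem.Int.floordiv k 2).toNat _ rfl hk' 2 (by omega)]
    rcases hmod with he | ho
    · rw [if_neg (by omega), mul_one_left,
        pw_red c q _ (by omega)]
      congr 1
      omega
    · rw [if_pos ho, hpw1, pw_mul c q 1 (by omega)]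
      congr 1
      omega
  · have hk1 : k = 1 := by omega
    have hmo : PySem.Int.mod k 2 = 1 := by omega
    rw [powLoopA, dif_neg hk', if_pos hmo, hpw1, hk1]
    rfl

-- B's left-to-right loop computes pw n for every positive n
theorem B_eq_pw (c : Int × Int × Int) (q : Int) :
    ∀ n : ℕ, 1 ≤ n → (natBits n).foldl (stepB c q) (1, 0, 0) = pw c q n := by
  intro n
  induction n using Nat.strong_induction_on with
  | _ n IH =>
    intro hn
    rw [natBits, if_neg (by omega), List.foldl_append]
    by_cases h2 : 2 ≤ n
    · rw [IH (n / 2) (Nat.div_lt_self (by omega) (by omega)) (by omega)]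
      have hsq : mulInCubic (pw c q (n / 2)) (pw c q (n / 2)) c q
          = pw c q (n / 2 + n / 2) := pw_mul c q (n / 2) (by omega) (n / 2)
      rcases Nat.mod_two_eq_zero_or_one n with he | ho
      · have hb : decide (n % 2 = 1) = false := by simp [he]
        simp only [List.foldl, stepB, hb, Bool.false_eq_true, hsq]
        rw [if_neg (by simp)]
        congr 1
        omega
      · have hb : decide (n % 2 = 1) = true := by simp [ho]
        simp only [List.foldl, stepB, hb, hsq, if_true]
        have : mulInCubic (pw c q (n / 2 + n / 2)) (0, 1, 0) c q
            = pw c q (n / 2 + n / 2 + 1) := rfl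
        rw [this]
        congr 1
        omega
    · -- n = 1: bits = [] ++ [true]
      have hn1 : n = 1 := by omega
      subst hn1
      rw [show (1 : ℕ) / 2 = 0 from rfl, natBits, if_pos rfl]
      simp only [List.foldl, stepB]
      rw [if_pos (by decide), mul_one_left, mul_modE_left]
      rfl

-- ===== VERDICT (by name: the statement is the Claim_ definition above) =====
theorem pow_x_fast_py_spec : Claim_equal_pow_x_fast_py := by
  intro cubic q k _ _
  unfold Spec_pow_x_fast_py
  rcases le_or_gt k 0 with hle | hpos
  · rw [pow_x_fast_py_alt, if_pos hle]
    rcases eq_or_lt_of_le hle with rfl | hneg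
    · rw [pow_x_fast_py, if_pos rfl]
    · rw [pow_x_fast_py, if_neg (by omega), powLoopA, dif_neg (by omega)]
  · rw [A_eq_pw cubic q k hpos, pow_x_fast_py_alt, if_neg (by omega),
      B_eq_pw cubic q k.toNat (by omega)]
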